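-- pv_equiv track=rewrite | github.com/geekyfaahad/Awaaz-news | backend/debug_askai.py | _headline_negates_claim
-- ===== SOURCE A (Python) =====
-- _NEGATION_OR_RUMOR_CUES = frozenset({
--     "no", "not", "fake", "false", "hoax", "rumor", "rumour",
--     "rumors", "rumours", "debunk", "debunked", "debunks", "denies",
--     "deny", "denied", "alive", "safe", "unharmed",
-- })
--
-- def _find_subject_spans(claim_subjects, headline_tokens):
--     if not claim_subjects or not headline_tokens:
--         return []
--
--     unique_subjects = list(dict.fromkeys(claim_subjects))
--     required_matches = 1 if len(unique_subjects) == 1 else 2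
--     spans = []
--
--     for start in range(len(headline_tokens)):
--         if headline_tokens[start] != unique_subjects[0]:
--             continue
--
--         matched = 1
--         last_pos = start
--         for token in unique_subjects[1:]:
--             found_pos = None
--             for pos in range(last_pos + 1, min(len(headline_tokens), last_pos + 3)):
--                 if headline_tokens[pos] == token:
--                     found_pos = pos
--                     break
--             if found_pos is None:
--                 break
--             matched += 1
--             last_pos = found_pos
--
--         if matched >= required_matches:
--             spans.append((start, last_pos))
--
--     return spans
--
-- def _headline_negates_claim(claim_subjects, headline_tokens, headline_actions):
--     if not claim_subjects or not headline_tokens: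
--         return False
--
--     subject_spans = _find_subject_spans(claim_subjects, headline_tokens)
--     if not subject_spans:
--         return False
--
--     negation_positions = [i for i, t in enumerate(headline_tokens) if t in _NEGATION_OR_RUMOR_CUES]
--     if not negation_positions:
--         return False
--
--     action_positions = [i for i, t in enumerate(headline_tokens) if t in headline_actions] if headline_actions else []
--
--     for span_start, span_end in subject_spans:
--         context_start = max(0, span_start - 4)
--         context_end = min(len(headline_tokens), span_end + 5)
--         if any(context_start <= pos < context_end for pos in negation_positions):
--             return True
--
--         for act_pos in action_positions:
--             context_start = max(0, min(span_start, act_pos) - 3)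
--             context_end = min(len(headline_tokens), max(span_end, act_pos) + 4)
--             if any(context_start <= pos < context_end for pos in negation_positions):
--                 return True
--
--     return False
-- ===== SOURCE B (Python) =====
-- _NEGATION_OR_RUMOR_CUES = frozenset({
--     "no", "not", "fake", "false", "hoax", "rumor", "rumour",
--     "rumors", "rumours", "debunk", "debunked", "debunks", "denies",
--     "deny", "denied", "alive", "safe", "unharmed",
-- })
--
--
-- def _greedy_end(uniq, start, tokens):
--     # Greedily chain the remaining unique subjects: each one must appear at
--     # distance 1 or 2 after the previously matched position.
--     last = start
--     matched = 1
--     for tok in uniq[1:]: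
--         if last + 1 < len(tokens) and tokens[last + 1] == tok:
--             last += 1
--         elif last + 2 < len(tokens) and tokens[last + 2] == tok:
--             last += 2
--         else:
--             break
--         matched += 1
--     required = 1 if len(uniq) == 1 else 2
--     return last if matched >= required else None
--
--
-- def _prefix_counts(tokens, members):
--     # pre[k] = how many of tokens[:k] are in `members`
--     pre = [0]
--     acc = 0
--     for t in tokens:
--         acc += 1 if t in members else 0
--         pre.append(acc)
--     return pre
--
--
-- def _headline_negates_claim(claim_subjects, headline_tokens, headline_actions):
--     if not claim_subjects or not headline_tokens:
--         return False
--     n = len(headline_tokens)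
--     uniq = list(dict.fromkeys(claim_subjects))
--     spans = []
--     for start in range(n):
--         if headline_tokens[start] == uniq[0]:
--             end = _greedy_end(uniq, start, headline_tokens)
--             if end is not None:
--                 spans.append((start, end))
--     if not spans:
--         return False
--     pre = _prefix_counts(headline_tokens, _NEGATION_OR_RUMOR_CUES)
--     if pre[n] == 0:
--         return False
--     action_set = set(headline_actions)
--     action_positions = [i for i in range(n) if headline_tokens[i] in action_set]
--     act_pre = _prefix_counts(headline_tokens, action_set)
--     if action_positions:
--         pmin = action_positions[0]
--         pmax = action_positions[-1]
--
--     def has_cue(a, b):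
--         # a cue sits at some position in [a, b) iff the prefix count grows
--         return pre[min(n, b)] > pre[max(0, a)]
--
--     for s, e in spans:
--         if has_cue(s - 4, e + 5):
--             return True
--         if action_positions:
--             # an action position p <= s widens the window leftwards: the widest is pmin
--             if pmin <= s and has_cue(pmin - 3, e + 4):
--                 return True
--             # an action position inside [s, e] gives the fixed window [s-3, e+4)
--             if act_pre[min(n, e + 1)] > act_pre[s] and has_cue(s - 3, e + 4):
--                 return True
--             # an action position p >= e widens the window rightwards: the widest is pmax
--             if pmax >= e and has_cue(s - 3, pmax + 4):
--                 return True
--     return False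
-- ===== Notes on version B (the rewrite author's own statement) =====
-- stated objective: alternative
-- what changed: B replaces A's per-(span,action) rescans of the negation-position list by prefix-count comparisons plus a first/last/interior action-position analysis (constant work per span after one linear preprocessing pass), and replaces the inner range(last+1,last+3) scan of the subject matcher by a direct 1/2-step test.
import Mathlib
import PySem

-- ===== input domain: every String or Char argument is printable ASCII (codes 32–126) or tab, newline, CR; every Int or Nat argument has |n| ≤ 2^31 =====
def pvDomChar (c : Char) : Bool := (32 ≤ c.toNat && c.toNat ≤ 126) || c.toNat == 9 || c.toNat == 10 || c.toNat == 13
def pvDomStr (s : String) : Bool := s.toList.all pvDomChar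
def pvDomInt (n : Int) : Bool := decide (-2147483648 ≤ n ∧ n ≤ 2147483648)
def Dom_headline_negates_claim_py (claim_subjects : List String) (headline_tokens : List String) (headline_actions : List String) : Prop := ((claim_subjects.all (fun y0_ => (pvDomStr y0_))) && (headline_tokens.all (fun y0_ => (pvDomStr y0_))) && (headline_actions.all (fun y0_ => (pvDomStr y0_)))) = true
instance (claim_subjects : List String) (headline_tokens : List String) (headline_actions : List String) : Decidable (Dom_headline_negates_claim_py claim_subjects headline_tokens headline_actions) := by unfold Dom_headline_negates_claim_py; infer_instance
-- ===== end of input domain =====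

-- B replaces A's per-(span,action) rescans of the negation-position list by prefix-count
-- comparisons and a first/last-action analysis, and replaces the inner range scan of the
-- subject matcher by a direct 1/2-step test; equivalence of the return value is proved on
-- all inputs (neither program mutates its arguments).

-- ===== PORT A =====
-- module constant _NEGATION_OR_RUMOR_CUES (a frozenset; both programs only test membership)
def pvCues : List String := PySem.Set.ofList
  ["no", "not", "fake", "false", "hoax", "rumor", "rumour",
   "rumors", "rumours", "debunk", "debunked", "debunks", "denies",
   "deny", "denied", "alive", "safe", "unharmed"]

-- A's inner 'for token in unique_subjects[1:]' loop carrying (matched, last_pos);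
-- the 'for pos in range(last_pos+1, min(n, last_pos+3)) … break' search is find? on that range
def pvChainA (tokens : List String) : List String → Nat → Nat → Nat × Nat
  | [], matched, lastPos => (matched, lastPos)
  | tok :: rest, matched, lastPos =>
    match (List.range' (lastPos + 1) (min tokens.length (lastPos + 3) - (lastPos + 1))).find?
        (fun pos => tokens.getD pos "" == tok) with
    | none => (matched, lastPos)
    | some p => pvChainA tokens rest (matched + 1) p

def pvFindSpansA (claim_subjects headline_tokens : List String) : List (Nat × Nat) :=
  if claim_subjects.isEmpty || headline_tokens.isEmpty then []
  else
    let uniq := PySem.List.dedup claim_subjects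
    let required := if uniq.length == 1 then 1 else 2
    (List.range headline_tokens.length).foldl (fun spans start =>
      if headline_tokens.getD start "" ≠ uniq.headD "" then spans
      else
        let ml := pvChainA headline_tokens (uniq.drop 1) 1 start
        if ml.1 ≥ required then spans ++ [(start, ml.2)] else spans) []

def headline_negates_claim_py (claim_subjects : List String) (headline_tokens : List String) (headline_actions : List String) : Bool :=
  if claim_subjects.isEmpty || headline_tokens.isEmpty then false
  else
    let spans := pvFindSpansA claim_subjects headline_tokens
    if spans.isEmpty then false
    else
      let negs : List Int := (PySem.List.enumerate headline_tokens 0).filterMap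
        (fun p => if pvCues.contains p.2 then some p.1 else none)
      if negs.isEmpty then false
      else
        let acts : List Int := if !headline_actions.isEmpty then
            (PySem.List.enumerate headline_tokens 0).filterMap
              (fun p => if headline_actions.contains p.2 then some p.1 else none)
          else []
        let n : Int := headline_tokens.length
        spans.any (fun se =>
          (negs.any (fun pos => decide (max 0 ((se.1 : Int) - 4) ≤ pos ∧ pos < min n ((se.2 : Int) + 5)))) ||
          acts.any (fun ap =>
            negs.any (fun pos => decide (max 0 (min (se.1 : Int) ap - 3) ≤ pos ∧ pos < min n (max (se.2 : Int) ap + 4)))))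

-- ===== PORT B =====
-- B's greedy chain: each further unique subject must sit 1 or 2 after the last match
def pvGreedyLoop (tokens : List String) : List String → Nat → Nat → Nat × Nat
  | [], matched, last => (matched, last)
  | tok :: rest, matched, last =>
    if last + 1 < tokens.length ∧ tokens.getD (last + 1) "" = tok then
      pvGreedyLoop tokens rest (matched + 1) (last + 1)
    else if last + 2 < tokens.length ∧ tokens.getD (last + 2) "" = tok then
      pvGreedyLoop tokens rest (matched + 1) (last + 2)
    else (matched, last)

def pvGreedyEnd (uniq : List String) (start : Nat) (tokens : List String) : Option Nat :=
  let ml := pvGreedyLoop tokens (uniq.drop 1) 1 start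
  let required := if uniq.length == 1 then 1 else 2
  if ml.1 ≥ required then some ml.2 else none

def pvSpansB (uniq headline_tokens : List String) : List (Nat × Nat) :=
  (List.range headline_tokens.length).foldl (fun spans start =>
    if headline_tokens.getD start "" = uniq.headD "" then
      match pvGreedyEnd uniq start headline_tokens with
      | some e => spans ++ [(start, e)]
      | none => spans
    else spans) []

-- _prefix_counts: running counts of tokens in `members` (pre = [0]; for t: acc += …; pre.append(acc))
def pvPrefixAux (q : String → Bool) (acc : Int) : List String → List Int
  | [] => []
  | t :: ts =>
    let acc' := acc + (if q t then 1 else 0)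
    acc' :: pvPrefixAux q acc' ts

-- Nat subtraction truncates at 0, which is exactly Python's max(0, a) on these indices
def headline_negates_claim_py_alt (claim_subjects : List String) (headline_tokens : List String) (headline_actions : List String) : Bool :=
  if claim_subjects.isEmpty || headline_tokens.isEmpty then false
  else
    let n := headline_tokens.length
    let uniq := PySem.List.dedup claim_subjects
    let spans := pvSpansB uniq headline_tokens
    if spans.isEmpty then false
    else
      let pre : List Int := 0 :: pvPrefixAux (fun t => pvCues.contains t) 0 headline_tokens
      if pre.getD n 0 == 0 then false
      else
        let actionSet := PySem.Set.ofList headline_actions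
        let acts : List Nat := (List.range n).filter (fun i => actionSet.contains (headline_tokens.getD i ""))
        let actPre : List Int := 0 :: pvPrefixAux (fun t => actionSet.contains t) 0 headline_tokens
        let pmin := acts.headD 0
        let pmax := acts.getLastD 0
        spans.any (fun se =>
          (decide (pre.getD (se.1 - 4) 0 < pre.getD (min n (se.2 + 5)) 0)) ||
          (!acts.isEmpty &&
            ((decide (pmin ≤ se.1) && decide (pre.getD (pmin - 3) 0 < pre.getD (min n (se.2 + 4)) 0)) ||
             (decide (actPre.getD se.1 0 < actPre.getD (min n (se.2 + 1)) 0) &&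
              decide (pre.getD (se.1 - 3) 0 < pre.getD (min n (se.2 + 4)) 0)) ||
             (decide (se.2 ≤ pmax) && decide (pre.getD (se.1 - 3) 0 < pre.getD (min n (pmax + 4)) 0)))))

-- ===== PRECONDITION & SPEC =====
def Spec_headline_negates_claim_py (claim_subjects : List String) (headline_tokens : List String) (headline_actions : List String) (out : Bool) : Prop := out = headline_negates_claim_py_alt claim_subjects headline_tokens headline_actions
instance (claim_subjects : List String) (headline_tokens : List String) (headline_actions : List String) (out : Bool) : Decidable (Spec_headline_negates_claim_py claim_subjects headline_tokens headline_actions out) := by unfold Spec_headline_negates_claim_py; infer_instance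

-- ===== CLAIM (what is proved, stated in full; the proofs are below) =====
def Claim_equal_headline_negates_claim_py : Prop := ∀ (claim_subjects : List String) (headline_tokens : List String) (headline_actions : List String), Dom_headline_negates_claim_py claim_subjects headline_tokens headline_actions → Spec_headline_negates_claim_py claim_subjects headline_tokens headline_actions (headline_negates_claim_py claim_subjects headline_tokens headline_actions)

-- ===== LEMMAS AND PROOFS =====

theorem pv_find_step (ts : List String) (lp : Nat) (tok : String) :
    (List.range' (lp + 1) (min ts.length (lp + 3) - (lp + 1))).find?
        (fun pos => ts.getD pos "" == tok)
    = if lp + 1 < ts.length ∧ ts.getD (lp + 1) "" = tok then some (lp + 1)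
      else if lp + 2 < ts.length ∧ ts.getD (lp + 2) "" = tok then some (lp + 2)
      else none := by
  rcases Nat.lt_or_ge (lp + 1) ts.length with h1 | h1
  · rcases Nat.lt_or_ge (lp + 2) ts.length with h2 | h2
    · have hm : min ts.length (lp + 3) - (lp + 1) = 2 := by omega
      rw [hm, show List.range' (lp + 1) 2 = [lp + 1, lp + 2] from by
        simp [List.range']]
      by_cases e1 : ts.getD (lp + 1) "" = tok
      · rw [List.find?_cons_of_pos (h := by simpa using e1)]
        rw [if_pos ⟨h1, e1⟩]
      · rw [List.find?_cons_of_neg (h := by simpa using e1), if_neg (by tauto)]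
        by_cases e2 : ts.getD (lp + 2) "" = tok
        · rw [List.find?_cons_of_pos (h := by simpa using e2), if_pos ⟨h2, e2⟩]
        · rw [List.find?_cons_of_neg (h := by simpa using e2), if_neg (by tauto)]
          rfl
    · have hm : min ts.length (lp + 3) - (lp + 1) = 1 := by omega
      rw [hm, List.range'_one]
      by_cases e1 : ts.getD (lp + 1) "" = tok
      · rw [List.find?_cons_of_pos (h := by simpa using e1), if_pos ⟨h1, e1⟩]
      · rw [List.find?_cons_of_neg (h := by simpa using e1), if_neg (by tauto),
          if_neg (by omega)]
        rfl
  · have hm : min ts.length (lp + 3) - (lp + 1) = 0 := by omega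
    rw [hm, if_neg (by omega), if_neg (by omega)]
    rfl

theorem pv_chain_eq (ts : List String) : ∀ (rest : List String) (m lp : Nat),
    pvChainA ts rest m lp = pvGreedyLoop ts rest m lp := by
  intro rest
  induction rest with
  | nil => intro m lp; rfl
  | cons tok rest ih =>
    intro m lp
    unfold pvChainA pvGreedyLoop
    rw [pv_find_step]
    split_ifs with e1 e2
    · exact ih (m + 1) (lp + 1)
    · exact ih (m + 1) (lp + 2)
    · rfl

theorem pv_spans_eq (cs ts : List String) (hc : cs.isEmpty = false) (ht : ts.isEmpty = false) :
    pvFindSpansA cs ts = pvSpansB (PySem.List.dedup cs) ts := by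
  unfold pvFindSpansA pvSpansB
  rw [if_neg (by simp [hc, ht])]
  apply PySem.List.foldl_congr_mem
  intro spans start _
  by_cases h : ts.getD start "" = (PySem.List.dedup cs).headD ""
  · rw [if_neg (by simpa using h), if_pos h]
    simp only [pvGreedyEnd, pv_chain_eq]
    split_ifs <;> rfl
  · rw [if_pos h, if_neg h]

theorem pv_greedy_ge (ts : List String) : ∀ (rest : List String) (m lp : Nat),
    lp ≤ (pvGreedyLoop ts rest m lp).2 := by
  intro rest
  induction rest with
  | nil => intro m lp; exact Nat.le_refl _
  | cons tok rest ih =>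
    intro m lp
    unfold pvGreedyLoop
    split_ifs with e1 e2
    · exact Nat.le_trans (by omega) (ih (m + 1) (lp + 1))
    · exact Nat.le_trans (by omega) (ih (m + 1) (lp + 2))
    · exact Nat.le_refl _

theorem pv_greedyEnd_ge (uniq ts : List String) (s e : Nat)
    (h : pvGreedyEnd uniq s ts = some e) : s ≤ e := by
  unfold pvGreedyEnd at h
  dsimp only at h
  split_ifs at h
  all_goals exact (Option.some.inj h) ▸ pv_greedy_ge ts _ 1 s

theorem pv_spansB_mem_aux (uniq ts : List String) : ∀ (l : List Nat) (acc : List (Nat × Nat)),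
    (∀ p ∈ acc, p.1 < ts.length ∧ p.1 ≤ p.2) → (∀ i ∈ l, i < ts.length) →
    ∀ p ∈ l.foldl (fun spans start =>
      if ts.getD start "" = uniq.headD "" then
        match pvGreedyEnd uniq start ts with
        | some e => spans ++ [(start, e)]
        | none => spans
      else spans) acc, p.1 < ts.length ∧ p.1 ≤ p.2 := by
  intro l
  induction l with
  | nil => intro acc ha _ p hp; exact ha p hp
  | cons i l ih =>
    intro acc ha hl p hp
    rw [List.foldl_cons] at hp
    refine ih _ ?_ (fun j hj => hl j (List.mem_cons_of_mem _ hj)) p hp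
    intro q hq
    split_ifs at hq with h
    · rcases hge : pvGreedyEnd uniq i ts with _ | e
      · rw [hge] at hq; exact ha q hq
      · rw [hge] at hq
        rcases List.mem_append.mp hq with h' | h'
        · exact ha q h'
        · have : q = (i, e) := by simpa using h'
          subst this
          exact ⟨hl i (List.mem_cons_self), pv_greedyEnd_ge uniq ts i e hge⟩
    · exact ha q hq

theorem pv_spansB_mem (uniq ts : List String) :
    ∀ p ∈ pvSpansB uniq ts, p.1 < ts.length ∧ p.1 ≤ p.2 := by
  intro p hp
  exact pv_spansB_mem_aux uniq ts _ [] (by simp) (fun i hi => List.mem_range.mp hi) p hp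

theorem pv_mem_enumFM (q : String → Bool) (ts : List String) (i : Int) :
    i ∈ (PySem.List.enumerate ts 0).filterMap (fun p => if q p.2 then some p.1 else none)
    ↔ ∃ (k : Nat) (hk : k < ts.length), i = (k : Int) ∧ q ts[k] := by
  rw [List.mem_filterMap]
  constructor
  · rintro ⟨p, hp, hv⟩
    rcases (PySem.List.mem_enumerate_iff ts 0 p).mp hp with ⟨k, hk, rfl⟩
    by_cases hq : q ts[k]
    · exact ⟨k, hk, by simpa [hq] using hv.symm, hq⟩
    · simp [hq] at hv
  · rintro ⟨k, hk, rfl, hq⟩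
    exact ⟨((k : Int), ts[k]), (PySem.List.mem_enumerate_iff ts 0 _).mpr ⟨k, hk, by simp⟩, by simp [hq]⟩

theorem pv_prefixAux_getD (q : String → Bool) (ts : List String) : ∀ (acc : Int) (k : Nat), k < ts.length →
    (pvPrefixAux q acc ts).getD k 0 = acc + (((ts.take (k + 1)).countP q : Nat) : Int) := by
  induction ts with
  | nil => intro acc k hk; simp at hk
  | cons t ts ih =>
    intro acc k hk
    cases k with
    | zero =>
      simp only [pvPrefixAux, List.getD_cons_zero, List.take_succ_cons, List.take_zero,
        List.countP_cons, List.countP_nil]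
      split_ifs <;> simp
    | succ k =>
      have hk' : k < ts.length := by simpa using hk
      simp only [pvPrefixAux, List.getD_cons_succ, List.take_succ_cons, List.countP_cons]
      rw [ih _ k hk']
      split_ifs <;> push_cast <;> ring

theorem pv_pre_getD (q : String → Bool) (ts : List String) (k : Nat) (hk : k ≤ ts.length) :
    (0 :: pvPrefixAux q 0 ts).getD k 0 = (((ts.take k).countP q : Nat) : Int) := by
  cases k with
  | zero => simp
  | succ k =>
    rw [List.getD_cons_succ, pv_prefixAux_getD q ts 0 k (by omega)]
    simp

theorem pv_seg_exists (q : String → Bool) (ts : List String) (a b : Nat) (hab : a ≤ b) (hb : b ≤ ts.length) :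
    ((0 :: pvPrefixAux q 0 ts).getD a 0 < (0 :: pvPrefixAux q 0 ts).getD b 0)
    ↔ ∃ (k : Nat) (hk : k < ts.length), a ≤ k ∧ k < b ∧ q ts[k] := by
  rw [pv_pre_getD q ts a (by omega), pv_pre_getD q ts b hb]
  have hsplit : ts.take b = ts.take a ++ (ts.drop a).take (b - a) := by
    rw [← List.take_add]
    congr 1
    omega
  rw [hsplit, List.countP_append]
  constructor
  · intro h
    have hpos : 0 < ((ts.drop a).take (b - a)).countP q := by
      have := List.length_take_le a ts
      omega
    rcases List.countP_pos_iff.mp hpos with ⟨x, hx, hqx⟩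
    rcases List.mem_iff_getElem.mp hx with ⟨j, hj, rfl⟩
    have hj1 : j < b - a := by
      have := hj
      simp [List.length_take, List.length_drop] at this
      omega
    have hj2 : a + j < ts.length := by
      have := hj
      simp [List.length_take, List.length_drop] at this
      omega
    refine ⟨a + j, hj2, by omega, by omega, ?_⟩
    have : ((ts.drop a).take (b - a))[j] = ts[a + j] := by
      rw [List.getElem_take, List.getElem_drop]
    rwa [this] at hqx
  · rintro ⟨k, hk, hak, hkb, hq⟩
    have hlen : k - a < ((ts.drop a).take (b - a)).length := by
      simp [List.length_take, List.length_drop]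
      omega
    have hmem : ts[k] ∈ (ts.drop a).take (b - a) := by
      refine List.mem_iff_getElem.mpr ⟨k - a, hlen, ?_⟩
      rw [List.getElem_take, List.getElem_drop]
      congr 1
      omega
    have := (List.countP_pos_iff (p := q)).mpr ⟨ts[k], hmem, hq⟩
    push_cast
    omega

theorem pv_negs_any (q : String → Bool) (ts : List String) (a b : Nat) (hab : a ≤ b) (hb : b ≤ ts.length) :
    ((PySem.List.enumerate ts 0).filterMap (fun p => if q p.2 then some p.1 else none)).any
        (fun pos => decide ((a : Int) ≤ pos ∧ pos < (b : Int)))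
    = decide ((0 :: pvPrefixAux q 0 ts).getD a 0 < (0 :: pvPrefixAux q 0 ts).getD b 0) := by
  rw [Bool.eq_iff_iff]
  rw [List.any_eq_true]
  rw [decide_eq_true_iff, pv_seg_exists q ts a b hab hb]
  constructor
  · rintro ⟨pos, hpos, hw⟩
    rcases (pv_mem_enumFM _ ts pos).mp hpos with ⟨k, hk, rfl, hq⟩
    rw [decide_eq_true_iff] at hw
    exact ⟨k, hk, by exact_mod_cast hw.1, by exact_mod_cast hw.2, hq⟩
  · rintro ⟨k, hk, hak, hkb, hq⟩
    refine ⟨(k : Int), (pv_mem_enumFM _ ts _).mpr ⟨k, hk, rfl, hq⟩, ?_⟩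
    rw [decide_eq_true_iff]
    exact ⟨by exact_mod_cast hak, by exact_mod_cast hkb⟩

theorem pv_negs_empty (ts : List String) :
    ((PySem.List.enumerate ts 0).filterMap (fun p => if pvCues.contains p.2 then some p.1 else none)).isEmpty
    = ((0 :: pvPrefixAux (fun t => pvCues.contains t) 0 ts).getD ts.length 0 == 0) := by
  rw [Bool.eq_iff_iff, List.isEmpty_iff, List.eq_nil_iff_forall_not_mem, beq_iff_eq,
    pv_pre_getD _ ts ts.length (le_refl _), List.take_of_length_le (le_refl _)]
  constructor
  · intro h
    norm_cast
    rw [List.countP_eq_zero]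
    intro x hx
    rcases List.mem_iff_getElem.mp hx with ⟨k, hk, rfl⟩
    intro hq
    exact h (k : Int) ((pv_mem_enumFM _ ts _).mpr ⟨k, hk, rfl, hq⟩)
  · intro h i hi
    rcases (pv_mem_enumFM _ ts i).mp hi with ⟨k, hk, rfl, hq⟩
    norm_cast at h
    rw [List.countP_eq_zero] at h
    exact h ts[k] (List.getElem_mem hk) hq

theorem pv_ofList_contains (as : List String) (t : String) :
    (PySem.Set.ofList as).contains t = as.contains t := by
  rw [Bool.eq_iff_iff]
  simp only [PySem.Set.contains_eq_listContains, List.contains_iff_mem]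
  exact (PySem.Set.mem_ofList _ _).trans (by simp)

theorem pv_headD_le {l : List Nat} (h : l.Pairwise (· < ·)) : ∀ x ∈ l, l.headD 0 ≤ x := by
  cases l with
  | nil => intro x hx; simp at hx
  | cons a l =>
    intro x hx
    rcases List.mem_cons.mp hx with rfl | hx
    · simp
    · have := (List.pairwise_cons.mp h).1 x hx
      simp
      omega

theorem pv_le_getLastD : ∀ (l : List Nat) (d : Nat), l.Pairwise (· < ·) → ∀ x ∈ l, x ≤ l.getLastD d := by
  intro l
  induction l with
  | nil => intro d _ x hx; simp at hx
  | cons a l ih =>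
    intro d h x hx
    rw [List.getLastD_cons]
    rcases List.mem_cons.mp hx with rfl | hx
    · cases l with
      | nil => simp
      | cons b l' =>
        have hab := (List.pairwise_cons.mp h).1 b List.mem_cons_self
        have hb := ih x (List.pairwise_cons.mp h).2 b List.mem_cons_self
        omega
    · exact ih a (List.pairwise_cons.mp h).2 x hx

theorem pv_headD_mem {l : List Nat} (h : l ≠ []) : l.headD 0 ∈ l := by
  cases l with
  | nil => exact absurd rfl h
  | cons a l => simp

theorem pv_getLastD_mem : ∀ (l : List Nat) (d : Nat), l ≠ [] → l.getLastD d ∈ l := by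
  intro l
  induction l with
  | nil => intro d h; exact absurd rfl h
  | cons a l ih =>
    intro d _
    rw [List.getLastD_cons]
    cases l with
    | nil => simp
    | cons b l' => exact List.mem_cons_of_mem _ (ih a (by simp))

theorem pv_seg_mono (q : String → Bool) (ts : List String) {a b a' b' : Nat} (ha : a' ≤ a) (hb : b ≤ b')
    (h : ∃ (k : Nat) (hk : k < ts.length), a ≤ k ∧ k < b ∧ q ts[k]) :
    ∃ (k : Nat) (hk : k < ts.length), a' ≤ k ∧ k < b' ∧ q ts[k] := by
  obtain ⟨k, hk, h1, h2, h3⟩ := h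
  exact ⟨k, hk, by omega, by omega, h3⟩

theorem pv_acts_any (ts as : List String) (s e : Nat) (hs : s < ts.length) (hse : s ≤ e) :
    (((PySem.List.enumerate ts 0).filterMap (fun p => if as.contains p.2 then some p.1 else none)).any
       (fun ap => ((PySem.List.enumerate ts 0).filterMap (fun p => if pvCues.contains p.2 then some p.1 else none)).any
          (fun pos => decide (max 0 (min (s : Int) ap - 3) ≤ pos ∧ pos < min (ts.length : Int) (max (e : Int) ap + 4)))))
    = (!((List.range ts.length).filter (fun i => (PySem.Set.ofList as).contains (ts.getD i ""))).isEmpty &&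
        ((decide (((List.range ts.length).filter (fun i => (PySem.Set.ofList as).contains (ts.getD i ""))).headD 0 ≤ s) &&
          decide ((0 :: pvPrefixAux (fun t => pvCues.contains t) 0 ts).getD ((((List.range ts.length).filter (fun i => (PySem.Set.ofList as).contains (ts.getD i ""))).headD 0) - 3) 0 <
            (0 :: pvPrefixAux (fun t => pvCues.contains t) 0 ts).getD (min ts.length (e + 4)) 0)) ||
         (decide ((0 :: pvPrefixAux (fun t => (PySem.Set.ofList as).contains t) 0 ts).getD s 0 <
            (0 :: pvPrefixAux (fun t => (PySem.Set.ofList as).contains t) 0 ts).getD (min ts.length (e + 1)) 0) &&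
          decide ((0 :: pvPrefixAux (fun t => pvCues.contains t) 0 ts).getD (s - 3) 0 <
            (0 :: pvPrefixAux (fun t => pvCues.contains t) 0 ts).getD (min ts.length (e + 4)) 0)) ||
         (decide (e ≤ (((List.range ts.length).filter (fun i => (PySem.Set.ofList as).contains (ts.getD i ""))).getLastD 0)) &&
          decide ((0 :: pvPrefixAux (fun t => pvCues.contains t) 0 ts).getD (s - 3) 0 <
            (0 :: pvPrefixAux (fun t => pvCues.contains t) 0 ts).getD (min ts.length ((((List.range ts.length).filter (fun i => (PySem.Set.ofList as).contains (ts.getD i ""))).getLastD 0) + 4)) 0)))) := by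
  have hmemB : ∀ k : Nat, k ∈ (List.range ts.length).filter (fun i => (PySem.Set.ofList as).contains (ts.getD i ""))
      ↔ ∃ hk : k < ts.length, as.contains ts[k] = true := by
    intro k
    rw [List.mem_filter, List.mem_range]
    constructor
    · rintro ⟨hk, hc⟩
      refine ⟨hk, ?_⟩
      rwa [List.getD_eq_getElem ts "" hk, pv_ofList_contains] at hc
    · rintro ⟨hk, hc⟩
      exact ⟨hk, by rwa [List.getD_eq_getElem ts "" hk, pv_ofList_contains]⟩
  have hpw : ((List.range ts.length).filter (fun i => (PySem.Set.ofList as).contains (ts.getD i ""))).Pairwise (· < ·) :=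
    List.Pairwise.filter _ (List.pairwise_lt_range)
  have hinner : ∀ k : Nat, k < ts.length →
      (((PySem.List.enumerate ts 0).filterMap (fun p => if pvCues.contains p.2 then some p.1 else none)).any
        (fun pos => decide (max 0 (min (s : Int) ((k : Nat) : Int) - 3) ≤ pos ∧ pos < min (ts.length : Int) (max (e : Int) ((k : Nat) : Int) + 4))))
      = decide ((0 :: pvPrefixAux (fun t => pvCues.contains t) 0 ts).getD (min s k - 3) 0 <
          (0 :: pvPrefixAux (fun t => pvCues.contains t) 0 ts).getD (min ts.length (max e k + 4)) 0) := by
    intro k hk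
    have ha : max 0 (min (s : Int) (k : Int) - 3) = ((min s k - 3 : Nat) : Int) := by omega
    have hb : min (ts.length : Int) (max (e : Int) (k : Int) + 4) = ((min ts.length (max e k + 4) : Nat) : Int) := by omega
    rw [ha, hb, pv_negs_any _ ts _ _ (by omega) (by omega)]
  rw [Bool.eq_iff_iff, List.any_eq_true]
  simp only [Bool.and_eq_true, Bool.or_eq_true, Bool.not_eq_true', List.isEmpty_eq_false_iff,
    decide_eq_true_eq]
  constructor
  · rintro ⟨ap, hap, hin⟩
    rcases (pv_mem_enumFM _ ts ap).mp hap with ⟨k, hk, rfl, hqk⟩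
    have hkB := (hmemB k).mpr ⟨hk, hqk⟩
    have hne := List.ne_nil_of_mem hkB
    rw [hinner k hk, decide_eq_true_eq] at hin
    have hseg := (pv_seg_exists _ ts _ _ (by omega) (by omega)).mp hin
    refine ⟨hne, ?_⟩
    rcases Nat.le_total k s with hks | hsk
    · left; left
      have hmin_le := pv_headD_le hpw k hkB
      refine ⟨by omega, ?_⟩
      apply (pv_seg_exists _ ts _ _ (by omega) (by omega)).mpr
      exact pv_seg_mono _ ts (by omega) (by omega) hseg
    · rcases Nat.le_total k e with hke | hek
      · left; right
        constructor
        · apply (pv_seg_exists _ ts _ _ (by omega) (by omega)).mpr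
          refine ⟨k, hk, hsk, by omega, ?_⟩
          rw [pv_ofList_contains]
          exact hqk
        · apply (pv_seg_exists _ ts _ _ (by omega) (by omega)).mpr
          exact pv_seg_mono _ ts (by omega) (by omega) hseg
      · right
        have hle_max := pv_le_getLastD _ 0 hpw k hkB
        refine ⟨by omega, ?_⟩
        apply (pv_seg_exists _ ts _ _ (by omega) (by omega)).mpr
        exact pv_seg_mono _ ts (by omega) (by omega) hseg
  · rintro ⟨hne, hd⟩
    rcases hd with (⟨h1, h2⟩ | ⟨h1, h2⟩) | ⟨h1, h2⟩
    · -- widest left window via the first action position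
      have hminB := pv_headD_mem hne
      rcases (hmemB _).mp hminB with ⟨hkmin, hqmin⟩
      have hcue := (pv_seg_exists _ ts _ _ (by omega) (by omega)).mp h2
      refine ⟨_, (pv_mem_enumFM _ ts _).mpr ⟨_, hkmin, rfl, hqmin⟩, ?_⟩
      rw [hinner _ hkmin, decide_eq_true_eq]
      apply (pv_seg_exists _ ts _ _ (by omega) (by omega)).mpr
      exact pv_seg_mono _ ts (by omega) (by omega) hcue
    · -- some action position inside [s, e]
      have hmid := (pv_seg_exists _ ts _ _ (by omega) (by omega)).mp h1
      obtain ⟨j, hj, hsj, hje, hqj⟩ := hmid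
      rw [pv_ofList_contains] at hqj
      have hcue := (pv_seg_exists _ ts _ _ (by omega) (by omega)).mp h2
      refine ⟨_, (pv_mem_enumFM _ ts _).mpr ⟨_, hj, rfl, hqj⟩, ?_⟩
      rw [hinner _ hj, decide_eq_true_eq]
      apply (pv_seg_exists _ ts _ _ (by omega) (by omega)).mpr
      exact pv_seg_mono _ ts (by omega) (by omega) hcue
    · -- widest right window via the last action position
      have hmaxB := pv_getLastD_mem _ 0 hne
      rcases (hmemB _).mp hmaxB with ⟨hkmax, hqmax⟩
      have hcue := (pv_seg_exists _ ts _ _ (by omega) (by omega)).mp h2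
      refine ⟨_, (pv_mem_enumFM _ ts _).mpr ⟨_, hkmax, rfl, hqmax⟩, ?_⟩
      rw [hinner _ hkmax, decide_eq_true_eq]
      apply (pv_seg_exists _ ts _ _ (by omega) (by omega)).mpr
      exact pv_seg_mono _ ts (by omega) (by omega) hcue

-- ===== VERDICT (by name: the statement is the Claim_ definition above) =====
theorem headline_negates_claim_py_spec : Claim_equal_headline_negates_claim_py := by
  intro cs ts as _
  unfold Spec_headline_negates_claim_py
  unfold headline_negates_claim_py headline_negates_claim_py_alt
  by_cases hg : (cs.isEmpty || ts.isEmpty) = true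
  · rw [if_pos hg, if_pos hg]
  · rw [if_neg hg, if_neg hg]
    have hc : cs.isEmpty = false := by simp at hg; exact by simpa using hg.1
    have ht : ts.isEmpty = false := by simp at hg; exact by simpa using hg.2
    simp only [pv_spans_eq cs ts hc ht]
    by_cases hsp : (pvSpansB (PySem.List.dedup cs) ts).isEmpty = true
    · rw [if_pos hsp, if_pos hsp]
    · rw [if_neg hsp, if_neg hsp]
      rw [pv_negs_empty ts]
      by_cases hz : ((0 :: pvPrefixAux (fun t => pvCues.contains t) 0 ts).getD ts.length 0 == 0) = true
      · rw [if_pos hz, if_pos hz]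
      · rw [if_neg hz, if_neg hz]
        apply PySem.List.any_congr_mem
        intro se hse
        obtain ⟨h1, h2⟩ := pv_spansB_mem _ ts se hse
        have ha : max 0 ((se.1 : Int) - 4) = ((se.1 - 4 : Nat) : Int) := by omega
        have hb : min ((ts.length : Nat) : Int) ((se.2 : Int) + 5) = ((min ts.length (se.2 + 5) : Nat) : Int) := by omega
        rw [ha, hb, pv_negs_any _ ts _ _ (by omega) (by omega)]
        by_cases hase : as.isEmpty = true
        · have : as = [] := List.isEmpty_iff.mp hase
          subst this
          have hfil : (List.range ts.length).filter (fun i => (PySem.Set.ofList ([] : List String)).contains (ts.getD i "")) = [] := by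
            simp [PySem.Set.ofList, PySem.Set.contains_eq_listContains]
          rw [hfil, if_neg (by simp)]
          simp only [List.any_nil, List.isEmpty_nil, Bool.not_true, Bool.false_and, Bool.or_false]
        · rw [Bool.not_eq_true] at hase
          simp only [hase, Bool.not_false, if_true]
          rw [pv_acts_any ts as se.1 se.2 h1 h2]
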